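-- pv_equiv track=rewrite | github.com/aliendevit/SmartDoctorOrganizerAgent | model_intent/hf_client.py | _normalize_dialog
-- ===== SOURCE A (Python) =====
-- _VALID_ROLES = {"system", "user", "assistant"}
--
-- def _normalize_dialog(messages, system=None, keep_last=24):
--     """Strict alternation (system?) → user → assistant → user …
--        * Collapses consecutive same-role turns
--        * Ensures first non-system is 'user'
--        * Ensures last is 'user' (so model generates an assistant reply)"""
--     msgs = []
--     if system:
--         msgs.append({"role": "system", "content": str(system)})
--
--     cleaned = [{"role": m.get("role","user"), "content": str(m.get("content",""))}
--                for m in (messages or []) if m and m.get("role") in _VALID_ROLES]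
--
--     for m in cleaned:
--         if msgs and msgs[-1]["role"] == m["role"] and m["role"] != "system":
--             msgs[-1]["content"] = (msgs[-1]["content"] + "\n" + m["content"]).strip()
--         else:
--             msgs.append(m)
--
--     i = 1 if (msgs and msgs[0]["role"] == "system") else 0
--     if len(msgs) <= i or msgs[i]["role"] != "user":
--         msgs.insert(i, {"role": "user", "content": ""})
--
--     alt = []
--     expect = "system" if (msgs and msgs[0]["role"] == "system") else "user"
--     for m in msgs:
--         if m["role"] == "system":
--             if not alt: alt.append(m)
--             expect = "user"; continue
--         if m["role"] != expect:
--             alt.append({"role": expect, "content": ""})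
--             expect = "assistant" if expect == "user" else "user"
--         alt.append(m)
--         expect = "assistant" if expect == "user" else "user"
--
--     if alt and alt[-1]["role"] != "user":
--         alt.append({"role": "user", "content": ""})
--
--     if keep_last and keep_last > 0:
--         head = alt[:1] if alt and alt[0]["role"] == "system" else []
--         tail = alt[1:] if head else alt
--         alt = head + tail[-keep_last:]
--     return alt
-- ===== SOURCE B (Python) =====
-- _VALID_ROLES = {"system", "user", "assistant"}
--
-- def _normalize_dialog(messages, system=None, keep_last=24):
--     """Single forward sweep: the collapse of consecutive same-role turns, the
--     leading-'user' guarantee and the strict-alternation placeholders are fused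
--     into one loop over the raw messages; trailing-'user' and the keep_last
--     window (preserving a system head) are applied afterwards."""
--     out = []
--     if system:
--         out.append({"role": "system", "content": str(system)})
--     expect = "user"
--     pending = True                      # leading 'user' turn not yet placed/verified
--     prev_role = "system" if out else ""
--     for m in (messages or []):
--         if not m or m.get("role") not in _VALID_ROLES:
--             continue
--         role = m.get("role", "user")
--         content = str(m.get("content", ""))
--         if role == prev_role and role != "system":
--             out[-1]["content"] = (out[-1]["content"] + "\n" + content).strip()
--             continue
--         prev_role = role
--         if role == "system":
--             if not out:
--                 out.append({"role": role, "content": content})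
--             elif pending:
--                 out.append({"role": "user", "content": ""})
--                 pending = False
--             expect = "user"
--             continue
--         if pending:
--             pending = False
--             if role != "user":
--                 out.append({"role": "user", "content": ""})
--                 expect = "assistant"
--         if role != expect:
--             out.append({"role": expect, "content": ""})
--             expect = "assistant" if expect == "user" else "user"
--         out.append({"role": role, "content": content})
--         expect = "assistant" if expect == "user" else "user"
--     if pending:
--         out.append({"role": "user", "content": ""})
--     elif out[-1]["role"] != "user":
--         out.append({"role": "user", "content": ""})
--     if keep_last and keep_last > 0:
--         head = out[:1] if out and out[0]["role"] == "system" else []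
--         tail = out[1:] if head else out
--         out = head + tail[-keep_last:]
--     return out
-- ===== Notes on version B (the rewrite author's own statement) =====
-- stated objective: alternative
-- what changed: A's three sequential passes (collapse consecutive same-role turns, leading-user insertion, strict-alternation rebuild) over intermediate lists are fused into one forward sweep over the raw messages that maintains the output list plus an expect/pending/prev_role state.
import Mathlib
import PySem

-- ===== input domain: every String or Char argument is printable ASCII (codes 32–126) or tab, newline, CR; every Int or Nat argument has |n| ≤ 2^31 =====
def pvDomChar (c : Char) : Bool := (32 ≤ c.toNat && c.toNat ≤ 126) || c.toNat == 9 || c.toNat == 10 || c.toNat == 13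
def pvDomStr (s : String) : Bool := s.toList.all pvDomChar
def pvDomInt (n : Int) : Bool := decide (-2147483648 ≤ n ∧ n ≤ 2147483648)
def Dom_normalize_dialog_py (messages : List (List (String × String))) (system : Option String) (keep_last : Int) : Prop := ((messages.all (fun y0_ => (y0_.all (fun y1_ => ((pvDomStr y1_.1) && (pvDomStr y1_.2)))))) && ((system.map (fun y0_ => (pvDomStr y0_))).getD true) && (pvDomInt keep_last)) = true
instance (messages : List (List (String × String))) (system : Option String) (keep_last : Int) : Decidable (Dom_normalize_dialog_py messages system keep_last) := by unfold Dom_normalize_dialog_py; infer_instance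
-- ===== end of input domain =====

-- B fuses A's three passes (collapse / leading-user insertion / alternation rebuild) into one
-- forward sweep with an expect/pending/prev_role state; same return value, no speed claim.

-- shared representation helpers: a chat turn is the dict {"role": r, "content": c}
def pvMk (r c : String) : List (String × String) := [("role", r), ("content", c)]
-- m.get(k) (first match, Python dict lookup)
def pvGet? (m : List (String × String)) (k : String) : Option String := (PySem.Dict.mk m).get? k
-- m.get(k, d)
def pvGetD (m : List (String × String)) (k : String) (d : String) : String := (pvGet? m k).getD d
-- m["role"] / m["content"]; on every dict these ports read, the key is present (constructed by pvMk)
def pvRole (m : List (String × String)) : String := pvGetD m "role" ""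
def pvCont (m : List (String × String)) : String := pvGetD m "content" ""
-- m["content"] = v  (overwrite in place)
def pvSetCont (m : List (String × String)) (v : String) : List (String × String) :=
  ((PySem.Dict.mk m).insert "content" v).items
-- m.get("role") in _VALID_ROLES
def pvValidRole? : Option String → Bool
  | some r => r == "system" || r == "user" || r == "assistant"
  | none => false
-- `m and m.get("role") in _VALID_ROLES`
def pvKeep (m : List (String × String)) : Bool := (!m.isEmpty) && pvValidRole? (pvGet? m "role")
-- expect = "assistant" if expect == "user" else "user"
def pvTog (e : String) : String := if e = "user" then "assistant" else "user"
-- `if system:` head (None and "" are falsy)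
def pvHead (system : Option String) : List (List (String × String)) :=
  match system with
  | none => []
  | some s => if s ≠ "" then [pvMk "system" s] else []
-- shared tail: keep_last window preserving a system head (identical lines in both Pythons)
def pvWindow (alt : List (List (String × String))) (keep_last : Int) : List (List (String × String)) :=
  if keep_last ≠ 0 ∧ 0 < keep_last then
    let head := if alt ≠ [] ∧ pvRole (PySem.List.pyGetD alt 0 []) = "system" then PySem.List.slice alt none (some 1) else []
    let tail := if head ≠ [] then PySem.List.slice alt (some 1) none else alt
    head ++ PySem.List.slice tail (some (-keep_last)) none
  else alt

-- ===== PORT A =====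
-- cleaned = [...] list comprehension
def pvCleaned (messages : List (List (String × String))) : List (List (String × String)) :=
  (messages.filter pvKeep).map (fun m => pvMk (pvGetD m "role" "user") (pvGetD m "content" ""))
-- body of A's first loop (collapse consecutive same-role turns)
def pvCollapseStep (msgs : List (List (String × String))) (m : List (String × String)) : List (List (String × String)) :=
  if msgs ≠ [] ∧ pvRole (PySem.List.pyGetD msgs (-1) []) = pvRole m ∧ pvRole m ≠ "system" then
    msgs.dropLast ++ [pvSetCont (PySem.List.pyGetD msgs (-1) [])
      (PySem.Str.strip (pvCont (PySem.List.pyGetD msgs (-1) []) ++ "\n" ++ pvCont m))]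
  else msgs ++ [m]
-- body of A's second loop (strict alternation); state = (alt, expect)
def pvAltStep (s : List (List (String × String)) × String) (m : List (String × String)) :
    List (List (String × String)) × String :=
  if pvRole m = "system" then
    ((if s.1 = [] then s.1 ++ [m] else s.1), "user")
  else if pvRole m ≠ s.2 then
    ((s.1 ++ [pvMk s.2 ""]) ++ [m], pvTog (pvTog s.2))
  else (s.1 ++ [m], pvTog s.2)
-- A's leading-user insertion step
def pvIns (msgs : List (List (String × String))) : List (List (String × String)) :=
  let i : Int := if msgs ≠ [] ∧ pvRole (PySem.List.pyGetD msgs 0 []) = "system" then 1 else 0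
  if (msgs.length : Int) ≤ i ∨ pvRole (PySem.List.pyGetD msgs i []) ≠ "user"
  then PySem.List.insert msgs i (pvMk "user" "") else msgs
-- A's initial `expect`
def pvE0 (msgs : List (List (String × String))) : String :=
  if msgs ≠ [] ∧ pvRole (PySem.List.pyGetD msgs 0 []) = "system" then "system" else "user"
-- A's trailing-user step
def pvTrail (alt : List (List (String × String))) : List (List (String × String)) :=
  if alt ≠ [] ∧ pvRole (PySem.List.pyGetD alt (-1) []) ≠ "user" then alt ++ [pvMk "user" ""] else alt
-- A's pipeline after the collapse loop: leading-user insert, alternation pass, trailing user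
def pvAPost (msgs1 : List (List (String × String))) : List (List (String × String)) :=
  pvTrail ((List.foldl pvAltStep ([], pvE0 (pvIns msgs1)) (pvIns msgs1)).1)
def pvAPre (messages : List (List (String × String))) (system : Option String) : List (List (String × String)) :=
  pvAPost ((pvCleaned messages).foldl pvCollapseStep (pvHead system))
def normalize_dialog_py (messages : List (List (String × String))) (system : Option String) (keep_last : Int) : List (List (String × String)) :=
  pvWindow (pvAPre messages system) keep_last

-- ===== PORT B =====
-- B's single sweep; returns (out, pending)
def pvBLoop (out : List (List (String × String))) (expect : String) (pending : Bool) (prevRole : String) :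
    List (List (String × String)) → List (List (String × String)) × Bool
  | [] => (out, pending)
  | m :: rest =>
    if pvKeep m = false then pvBLoop out expect pending prevRole rest
    else
      let role := pvGetD m "role" "user"
      let content := pvGetD m "content" ""
      if role = prevRole ∧ role ≠ "system" then
        pvBLoop (out.dropLast ++ [pvSetCont (PySem.List.pyGetD out (-1) [])
          (PySem.Str.strip (pvCont (PySem.List.pyGetD out (-1) []) ++ "\n" ++ content))])
          expect pending prevRole rest
      else if role = "system" then
        (if out = [] then pvBLoop (out ++ [pvMk role content]) "user" pending role rest
         else if pending then pvBLoop (out ++ [pvMk "user" ""]) "user" false role rest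
         else pvBLoop out "user" pending role rest)
      else
        let st := if pending then (if role ≠ "user" then (out ++ [pvMk "user" ""], "assistant") else (out, expect)) else (out, expect)
        let st2 := if role ≠ st.2 then (st.1 ++ [pvMk st.2 ""], pvTog st.2) else st
        pvBLoop (st2.1 ++ [pvMk role content]) (pvTog st2.2) false role rest
-- B's trailing-user step
def pvBPost (r : List (List (String × String)) × Bool) : List (List (String × String)) :=
  if r.2 then r.1 ++ [pvMk "user" ""]
  else if pvRole (PySem.List.pyGetD r.1 (-1) []) ≠ "user" then r.1 ++ [pvMk "user" ""] else r.1
def pvBPre (messages : List (List (String × String))) (system : Option String) : List (List (String × String)) :=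
  pvBPost (pvBLoop (pvHead system) "user" true (if pvHead system ≠ [] then "system" else "") messages)
def normalize_dialog_py_alt (messages : List (List (String × String))) (system : Option String) (keep_last : Int) : List (List (String × String)) :=
  pvWindow (pvBPre messages system) keep_last

-- ===== PRECONDITION & SPEC =====
def Spec_normalize_dialog_py (messages : List (List (String × String))) (system : Option String) (keep_last : Int) (out : List (List (String × String))) : Prop := out = normalize_dialog_py_alt messages system keep_last
instance (messages : List (List (String × String))) (system : Option String) (keep_last : Int) (out : List (List (String × String))) : Decidable (Spec_normalize_dialog_py messages system keep_last out) := by unfold Spec_normalize_dialog_py; infer_instance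

-- ===== CLAIM (what is proved, stated in full; the proofs are below) =====
def Claim_equal_normalize_dialog_py : Prop := ∀ (messages : List (List (String × String))) (system : Option String) (keep_last : Int), Dom_normalize_dialog_py messages system keep_last → Spec_normalize_dialog_py messages system keep_last (normalize_dialog_py messages system keep_last)

-- ===== LEMMAS AND PROOFS =====

set_option maxHeartbeats 1000000

-- proof-side abstractions: the pair (role, content) stream behind the dicts
def pvMkP (p : String × String) : List (String × String) := pvMk p.1 p.2
def pvPairs (messages : List (List (String × String))) : List (String × String) :=
  (messages.filter pvKeep).map (fun m => (pvGetD m "role" "user", pvGetD m "content" ""))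
-- A's collapse loop on the pair stream
def pvCgo : String × String → List (String × String) → List (String × String)
  | p, [] => [p]
  | p, q :: qs => if q.1 = p.1 ∧ q.1 ≠ "system" then pvCgo (p.1, PySem.Str.strip (p.2 ++ "\n" ++ q.2)) qs
                  else p :: pvCgo q qs
def pvRest : List (String × String) → List (String × String)
  | [] => []
  | q :: qs => pvCgo q qs
-- B's sweep on the pair stream
def pvBLoopF (out : List (List (String × String))) (expect : String) (pending : Bool) (prevRole : String) :
    List (String × String) → List (List (String × String)) × Bool
  | [] => (out, pending)
  | (r, c) :: rest =>
    if r = prevRole ∧ r ≠ "system" then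
      pvBLoopF (out.dropLast ++ [pvSetCont (PySem.List.pyGetD out (-1) [])
        (PySem.Str.strip (pvCont (PySem.List.pyGetD out (-1) []) ++ "\n" ++ c))])
        expect pending prevRole rest
    else if r = "system" then
      (if out = [] then pvBLoopF (out ++ [pvMk r c]) "user" pending r rest
       else if pending then pvBLoopF (out ++ [pvMk "user" ""]) "user" false r rest
       else pvBLoopF out "user" pending r rest)
    else
      let st := if pending then (if r ≠ "user" then (out ++ [pvMk "user" ""], "assistant") else (out, expect)) else (out, expect)
      let st2 := if r ≠ st.2 then (st.1 ++ [pvMk st.2 ""], pvTog st.2) else st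
      pvBLoopF (st2.1 ++ [pvMk r c]) (pvTog st2.2) false r rest

-- computation lemmas on the dict representation
theorem pvRole_mk (r c : String) : pvRole (pvMk r c) = r := by
  simp [pvRole, pvGetD, pvGet?, pvMk, PySem.Dict.get?_mk_cons]
theorem pvCont_mk (r c : String) : pvCont (pvMk r c) = c := by
  simp [pvCont, pvGetD, pvGet?, pvMk, PySem.Dict.get?_mk_cons]
theorem pvSetCont_mk (r c v : String) : pvSetCont (pvMk r c) v = pvMk r v := by
  simp [pvSetCont, pvMk, PySem.Dict.items_insert]

-- Python indexing helpers on literal shapes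
theorem pvGetD1 {α : Type} (x y : α) (t : List α) (d : α) :
    PySem.List.pyGetD (x :: y :: t) (1 : Int) d = y := by
  have h : ((1 : Nat) : Int) = (1 : Int) := by norm_num
  rw [← h, PySem.List.pyGetD_natCast]
  simp
theorem pvGetDlast {α : Type} (x : α) (d : α) :
    PySem.List.pyGetD [x] (-1 : Int) d = x := by
  simpa using PySem.List.pyGetD_neg_one_append_singleton (xs := ([] : List α)) (x := x) (d := d)
theorem pvInsert1 {α : Type} (x : α) (t : List α) (v : α) :
    PySem.List.insert (x :: t) (1 : Int) v = x :: v :: t := by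
  rw [PySem.List.insert_ofNat _ 1 _ (by simp)]
  simp

-- characterizations of the alternation step
theorem pvAltStep_sys (s : List (List (String × String)) × String) (m : List (String × String))
    (hm : pvRole m = "system") (h1 : s.1 ≠ []) : pvAltStep s m = (s.1, "user") := by
  rw [pvAltStep, if_pos hm, if_neg h1]
theorem pvAltStep_sys0 (s : List (List (String × String)) × String) (m : List (String × String))
    (hm : pvRole m = "system") (h1 : s.1 = []) : pvAltStep s m = (s.1 ++ [m], "user") := by
  rw [pvAltStep, if_pos hm, if_pos h1]
theorem pvAltStep_hit (s : List (List (String × String)) × String) (r c : String)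
    (hr : r ≠ "system") (he : r = s.2) : pvAltStep s (pvMk r c) = (s.1 ++ [pvMk r c], pvTog s.2) := by
  rw [pvAltStep, if_neg (by rw [pvRole_mk]; exact hr), if_neg (by rw [pvRole_mk]; exact not_not_intro he)]
theorem pvAltStep_miss (s : List (List (String × String)) × String) (r c : String)
    (hr : r ≠ "system") (he : r ≠ s.2) :
    pvAltStep s (pvMk r c) = ((s.1 ++ [pvMk s.2 ""]) ++ [pvMk r c], pvTog (pvTog s.2)) := by
  rw [pvAltStep, if_neg (by rw [pvRole_mk]; exact hr), if_pos (by rw [pvRole_mk]; exact he)]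

-- characterizations of B's pair-stream step
theorem pvBLoopF_merge (out : List (List (String × String))) (e : String) (p : Bool) (pr r c : String)
    (rest : List (String × String)) (h : r = pr ∧ r ≠ "system") :
    pvBLoopF out e p pr ((r, c) :: rest)
      = pvBLoopF (out.dropLast ++ [pvSetCont (PySem.List.pyGetD out (-1) [])
          (PySem.Str.strip (pvCont (PySem.List.pyGetD out (-1) []) ++ "\n" ++ c))]) e p pr rest := by
  simp only [pvBLoopF]
  rw [if_pos h]

-- bridge: A's cleaned list is the pair stream rendered as dicts
theorem pvCleaned_eq (messages : List (List (String × String))) :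
    pvCleaned messages = (pvPairs messages).map pvMkP := by
  simp [pvCleaned, pvPairs, List.map_map, pvMkP, Function.comp]

-- bridge: A's collapse loop = pvCgo
theorem pvCollapse_eq (ps : List (String × String)) :
    ∀ (acc : List (List (String × String))) (r c : String),
    List.foldl pvCollapseStep (acc ++ [pvMk r c]) (ps.map pvMkP)
      = acc ++ (pvCgo (r, c) ps).map pvMkP := by
  induction ps with
  | nil => intro acc r c; simp [pvCgo, pvMkP]
  | cons q qs ih =>
    intro acc r c
    obtain ⟨r', c'⟩ := q
    by_cases hm : r' = r ∧ r' ≠ "system"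
    · obtain ⟨hm1, hm2⟩ := hm
      subst hm1
      rw [List.map_cons, List.foldl_cons,
        show pvCollapseStep (acc ++ [pvMk r' c]) (pvMkP (r', c'))
            = acc ++ [pvMk r' (PySem.Str.strip (c ++ "\n" ++ c'))] from by
          simp [pvCollapseStep, pvMkP, pvRole_mk, pvCont_mk, pvSetCont_mk, hm2,
            PySem.List.pyGetD_neg_one_append_singleton]]
      rw [ih acc r' (PySem.Str.strip (c ++ "\n" ++ c'))]
      have hcg : pvCgo (r', c) ((r', c') :: qs) = pvCgo (r', PySem.Str.strip (c ++ "\n" ++ c')) qs := by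
        simp [pvCgo, hm2]
      rw [hcg]
    · have hm' : ¬(pvRole (pvMk r c) = pvRole (pvMkP (r', c')) ∧ pvRole (pvMkP (r', c')) ≠ "system") := by
        simp only [pvMkP, pvRole_mk]
        intro hcon
        exact hm ⟨hcon.1.symm, hcon.2⟩
      rw [List.map_cons, List.foldl_cons,
        show pvCollapseStep (acc ++ [pvMk r c]) (pvMkP (r', c'))
            = (acc ++ [pvMk r c]) ++ [pvMk r' c'] from by
          rw [pvCollapseStep, if_neg]
          · rfl
          · rw [PySem.List.pyGetD_neg_one_append_singleton]
            intro hcon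
            exact hm' ⟨hcon.2.1, hcon.2.2⟩]
      rw [ih (acc ++ [pvMk r c]) r' c']
      have hcg : pvCgo (r, c) ((r', c') :: qs) = (r, c) :: pvCgo (r', c') qs := by
        simp only [pvCgo]
        rw [if_neg hm]
      rw [hcg]
      simp [pvMkP]

-- head of the collapsed stream keeps the first role
theorem pvCgo_head (ps : List (String × String)) :
    ∀ r c : String, ∃ c' ys, pvCgo (r, c) ps = (r, c') :: ys := by
  induction ps with
  | nil => intro r c; exact ⟨c, [], by simp [pvCgo]⟩
  | cons q qs ih =>
    intro r c
    by_cases h : q.1 = r ∧ q.1 ≠ "system"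
    · obtain ⟨c', ys, hy⟩ := ih r (PySem.Str.strip (c ++ "\n" ++ q.2))
      refine ⟨c', ys, ?_⟩
      rw [show pvCgo (r, c) (q :: qs) = pvCgo (r, PySem.Str.strip (c ++ "\n" ++ q.2)) qs from by
        simp only [pvCgo]; rw [if_pos h]]
      exact hy
    · refine ⟨c, pvCgo q qs, ?_⟩
      simp only [pvCgo]
      rw [if_neg h]

-- nothing merges into a system turn
theorem pvCgo_sys (ps : List (String × String)) (c : String) :
    pvCgo ("system", c) ps = ("system", c) :: pvRest ps := by
  cases ps with
  | nil => rfl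
  | cons q qs => simp [pvCgo, pvRest]

-- B's sweep ignores filtered-out raw messages
theorem pvPairs_cons (m : List (String × String)) (ms : List (List (String × String))) :
    pvPairs (m :: ms)
      = if pvKeep m then (pvGetD m "role" "user", pvGetD m "content" "") :: pvPairs ms else pvPairs ms := by
  by_cases h : pvKeep m <;> simp [pvPairs, h]

theorem pvBLoop_eq (ms : List (List (String × String))) :
    ∀ out e p pr, pvBLoop out e p pr ms = pvBLoopF out e p pr (pvPairs ms) := by
  induction ms with
  | nil => intro out e p pr; simp [pvBLoop, pvBLoopF, pvPairs]
  | cons m ms ih =>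
    intro out e p pr
    rw [pvPairs_cons]
    cases hk : pvKeep m with
    | false =>
      simp only [pvBLoop, hk, Bool.false_eq_true, if_true, if_false]
      exact ih out e p pr
    | true =>
      simp only [pvBLoop, pvBLoopF, hk, Bool.true_eq_false, if_false, if_true]
      split_ifs <;> apply ih

-- once resolved, pending stays false
theorem pvBLoopF_pending (xs : List (String × String)) :
    ∀ out e pr, (pvBLoopF out e false pr xs).2 = false := by
  induction xs with
  | nil => intro out e pr; rfl
  | cons q qs ih =>
    intro out e pr
    obtain ⟨r, c⟩ := q
    simp only [pvBLoopF]
    split_ifs <;> apply ih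

-- the alternation step never empties alt
theorem pvAltStep_ne (s : List (List (String × String)) × String) (m : List (String × String)) :
    (pvAltStep s m).1 ≠ [] := by
  rw [pvAltStep]
  split_ifs <;> simp_all

theorem pvAltFold_ne (ms : List (List (String × String))) :
    ∀ s : List (List (String × String)) × String, s.1 ≠ [] → (List.foldl pvAltStep s ms).1 ≠ [] := by
  induction ms with
  | nil => intro s h; exact h
  | cons m ms ih => intro s h; rw [List.foldl_cons]; exact ih _ (pvAltStep_ne s m)

theorem pvAltFold_cgo_ne (ps : List (String × String)) (r c : String)
    (s : List (List (String × String)) × String) :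
    (List.foldl pvAltStep s ((pvCgo (r, c) ps).map pvMkP)).1 ≠ [] := by
  obtain ⟨c', ys, hy⟩ := pvCgo_head ps r c
  rw [hy, List.map_cons, List.foldl_cons]
  exact pvAltFold_ne _ _ (pvAltStep_ne s _)

-- one resolved B step = feeding pvAltStep
theorem pvBstep (out : List (List (String × String))) (e pr r' c' : String) (qs : List (String × String))
    (hout : out ≠ []) (hm : ¬(r' = pr ∧ r' ≠ "system")) :
    pvBLoopF out e false pr ((r', c') :: qs)
      = pvBLoopF (pvAltStep (out, e) (pvMk r' c')).1 (pvAltStep (out, e) (pvMk r' c')).2 false r' qs := by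
  by_cases hsy : r' = "system"
  · rw [pvAltStep_sys (out, e) _ (by rw [pvRole_mk]; exact hsy) hout]
    simp only [pvBLoopF]
    rw [if_neg hm, if_pos hsy, if_neg hout]
    simp
  · by_cases he : r' = e
    · rw [pvAltStep_hit (out, e) r' c' hsy he]
      simp only [pvBLoopF]
      rw [if_neg hm, if_neg hsy]
      simp [not_not_intro he]
    · rw [pvAltStep_miss (out, e) r' c' hsy he]
      simp only [pvBLoopF]
      rw [if_neg hm, if_neg hsy]
      simp [he]

-- CORE: past the head/insertion prefix, A's alternation pass over the collapsed
-- stream equals B's fused sweep with pending resolved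
theorem pvCore (xs : List (String × String)) :
    ∀ (alt : List (List (String × String))) (e r c : String),
    (List.foldl pvAltStep (alt, e) ((pvCgo (r, c) xs).map pvMkP)).1
      = (pvBLoopF (pvAltStep (alt, e) (pvMk r c)).1 (pvAltStep (alt, e) (pvMk r c)).2 false r xs).1 := by
  induction xs with
  | nil =>
    intro alt e r c
    show (List.foldl pvAltStep (alt, e) [pvMkP (r, c)]).1 = _
    simp [pvBLoopF, pvMkP]
  | cons q qs ih =>
    intro alt e r c
    obtain ⟨r', c'⟩ := q
    by_cases hm : r' = r ∧ r' ≠ "system"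
    · obtain ⟨hm1, hm2⟩ := hm
      subst hm1
      have hS : ∀ cc, pvAltStep (alt, e) (pvMk r' cc)
          = ((if r' = e then alt else alt ++ [pvMk e ""]) ++ [pvMk r' cc],
             if r' = e then pvTog e else pvTog (pvTog e)) := by
        intro cc
        by_cases hre : r' = e
        · rw [pvAltStep_hit (alt, e) r' cc hm2 hre, if_pos hre, if_pos hre]
        · rw [pvAltStep_miss (alt, e) r' cc hm2 hre, if_neg hre, if_neg hre]
      rw [show pvCgo (r', c) ((r', c') :: qs) = pvCgo (r', PySem.Str.strip (c ++ "\n" ++ c')) qs from by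
        simp [pvCgo, hm2]]
      rw [ih alt e r' (PySem.Str.strip (c ++ "\n" ++ c'))]
      rw [hS, hS]
      simp only []
      rw [pvBLoopF_merge _ _ _ _ _ _ _ ⟨rfl, hm2⟩]
      rw [PySem.List.pyGetD_neg_one_append_singleton, List.dropLast_concat, pvCont_mk, pvSetCont_mk]
    · have hSne := pvAltStep_ne (alt, e) (pvMk r c)
      rw [show pvCgo (r, c) ((r', c') :: qs) = (r, c) :: pvCgo (r', c') qs from by
        simp only [pvCgo]; rw [if_neg hm]]
      rw [List.map_cons, List.foldl_cons,
        show pvMkP (r, c) = pvMk r c from rfl,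
        show List.foldl pvAltStep (pvAltStep (alt, e) (pvMk r c)) ((pvCgo (r', c') qs).map pvMkP)
          = List.foldl pvAltStep ((pvAltStep (alt, e) (pvMk r c)).1, (pvAltStep (alt, e) (pvMk r c)).2) ((pvCgo (r', c') qs).map pvMkP) from by simp]
      rw [ih (pvAltStep (alt, e) (pvMk r c)).1 (pvAltStep (alt, e) (pvMk r c)).2 r' c']
      rw [pvBstep _ _ _ _ _ qs hSne hm]

-- end-of-pipeline agreement once pending is resolved and the list is nonempty
theorem pvPostF (P : List (List (String × String)) × Bool) (h2 : P.2 = false) (h1 : P.1 ≠ []) :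
    pvTrail P.1 = pvBPost P := by
  rw [pvTrail, pvBPost, h2]
  by_cases hx : pvRole (PySem.List.pyGetD P.1 (-1) []) ≠ "user" <;> simp [hx, h1]

-- trailing step on a list ending in an (empty) user turn
theorem pvTrail_app_user (L : List (List (String × String))) (c : String) :
    pvTrail (L ++ [pvMk "user" c]) = L ++ [pvMk "user" c] := by
  rw [pvTrail, if_neg]
  rintro ⟨-, h2⟩
  exact h2 (by rw [PySem.List.pyGetD_neg_one_append_singleton, pvRole_mk])

-- characterizations of the insertion step and initial expect
theorem pvIns_nil : pvIns [] = [pvMk "user" ""] := by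
  rw [pvIns]
  simp [PySem.List.insert_zero]
theorem pvIns_sys1 (x : List (String × String)) (hx : pvRole x = "system") :
    pvIns [x] = [x, pvMk "user" ""] := by
  have hi : (if ([x] ≠ [] ∧ pvRole (PySem.List.pyGetD [x] 0 []) = "system") then (1 : Int) else 0) = 1 := by
    rw [if_pos ⟨by simp, by rw [PySem.List.pyGetD_zero_cons]; exact hx⟩]
  simp only [pvIns, hi]
  rw [if_pos (Or.inl (by simp)), pvInsert1]
theorem pvIns_sys_user (x y : List (String × String)) (M : List (List (String × String)))
    (hx : pvRole x = "system") (hy : pvRole y = "user") : pvIns (x :: y :: M) = x :: y :: M := by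
  have hi : (if ((x :: y :: M) ≠ [] ∧ pvRole (PySem.List.pyGetD (x :: y :: M) 0 []) = "system") then (1 : Int) else 0) = 1 := by
    rw [if_pos ⟨by simp, by rw [PySem.List.pyGetD_zero_cons]; exact hx⟩]
  simp only [pvIns, hi]
  rw [if_neg]
  rintro (h | h)
  · simp only [List.length_cons] at h
    omega
  · exact h (by rw [pvGetD1]; exact hy)
theorem pvIns_sys_other (x y : List (String × String)) (M : List (List (String × String)))
    (hx : pvRole x = "system") (hy : pvRole y ≠ "user") :
    pvIns (x :: y :: M) = x :: pvMk "user" "" :: y :: M := by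
  have hi : (if ((x :: y :: M) ≠ [] ∧ pvRole (PySem.List.pyGetD (x :: y :: M) 0 []) = "system") then (1 : Int) else 0) = 1 := by
    rw [if_pos ⟨by simp, by rw [PySem.List.pyGetD_zero_cons]; exact hx⟩]
  simp only [pvIns, hi]
  rw [if_pos (Or.inr (by rw [pvGetD1]; exact hy)), pvInsert1]
theorem pvIns_user (x : List (String × String)) (M : List (List (String × String)))
    (hx : pvRole x = "user") : pvIns (x :: M) = x :: M := by
  have hi : (if ((x :: M) ≠ [] ∧ pvRole (PySem.List.pyGetD (x :: M) 0 []) = "system") then (1 : Int) else 0) = 0 := by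
    rw [if_neg]
    rintro ⟨-, h⟩
    rw [PySem.List.pyGetD_zero_cons, hx] at h
    exact absurd h (by decide)
  simp only [pvIns, hi]
  rw [if_neg]
  rintro (h | h)
  · simp only [List.length_cons] at h
    omega
  · exact h (by rw [PySem.List.pyGetD_zero_cons]; exact hx)
theorem pvIns_other (x : List (String × String)) (M : List (List (String × String)))
    (hx1 : pvRole x ≠ "system") (hx2 : pvRole x ≠ "user") :
    pvIns (x :: M) = pvMk "user" "" :: x :: M := by
  have hi : (if ((x :: M) ≠ [] ∧ pvRole (PySem.List.pyGetD (x :: M) 0 []) = "system") then (1 : Int) else 0) = 0 := by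
    rw [if_neg]
    rintro ⟨-, h⟩
    rw [PySem.List.pyGetD_zero_cons] at h
    exact hx1 h
  simp only [pvIns, hi]
  rw [if_pos (Or.inr (by rw [PySem.List.pyGetD_zero_cons]; exact hx2)), PySem.List.insert_zero]
theorem pvE0_sys (x : List (String × String)) (M : List (List (String × String)))
    (hx : pvRole x = "system") : pvE0 (x :: M) = "system" := by
  rw [pvE0, if_pos ⟨by simp, by rw [PySem.List.pyGetD_zero_cons]; exact hx⟩]
theorem pvE0_nonsys (x : List (String × String)) (M : List (List (String × String)))
    (hx : pvRole x ≠ "system") : pvE0 (x :: M) = "user" := by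
  rw [pvE0, if_neg]
  rintro ⟨-, h⟩
  rw [PySem.List.pyGetD_zero_cons] at h
  exact hx h

-- everything after an established system head
theorem pvAfterSys (l : List (String × String)) (H : List (String × String)) (hH : pvRole H = "system") :
    pvAPost (H :: (pvRest l).map pvMkP) = pvBPost (pvBLoopF [H] "user" true "system" l) := by
  have hstep1 : pvAltStep ([], "system") H = ([H], "user") := by
    rw [pvAltStep_sys0 ([], "system") H hH rfl]
    simp
  have hstepU : pvAltStep ([H], "user") (pvMk "user" "") = ([H, pvMk "user" ""], "assistant") := by
    rw [pvAltStep_hit ([H], "user") "user" "" (by decide) rfl]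
    simp [pvTog]
  have hU : pvRole (pvMk "user" "") = "user" := pvRole_mk _ _
  cases l with
  | nil =>
    rw [show pvRest [] = [] from rfl, List.map_nil, pvAPost, pvIns_sys1 H hH,
      pvE0_sys H _ hH, List.foldl_cons, hstep1, List.foldl_cons, hstepU, List.foldl_nil]
    rw [show ([H, pvMk "user" ""] : List (List (String × String))) = [H] ++ [pvMk "user" ""] from rfl,
      pvTrail_app_user]
    rw [show pvBLoopF [H] "user" true "system" [] = ([H], true) from rfl, pvBPost]
    simp
  | cons q qs =>
    obtain ⟨r, c⟩ := q
    rw [show pvRest ((r, c) :: qs) = pvCgo (r, c) qs from rfl]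
    obtain ⟨c1, ys, hy⟩ := pvCgo_head qs r c
    by_cases hu : r = "user"
    · -- no leading-user insertion needed
      rw [pvAPost,
        show pvIns (H :: (pvCgo (r, c) qs).map pvMkP) = H :: (pvCgo (r, c) qs).map pvMkP from by
          rw [hy, List.map_cons]
          exact pvIns_sys_user H _ _ hH (by rw [show pvMkP (r, c1) = pvMk r c1 from rfl, pvRole_mk]; exact hu),
        pvE0_sys H _ hH, List.foldl_cons, hstep1, pvCore qs [H] "user" r c]
      have hfeed : pvAltStep ([H], "user") (pvMk r c) = ([H, pvMk r c], "assistant") := by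
        rw [pvAltStep_hit ([H], "user") r c (by rw [hu]; decide) hu]
        simp [pvTog]
      have hBside : pvBLoopF [H] "user" true "system" ((r, c) :: qs)
          = pvBLoopF [H, pvMk r c] "assistant" false r qs := by
        subst hu
        simp [pvBLoopF, pvTog]
      rw [hfeed, hBside]
      exact pvPostF _ (pvBLoopF_pending qs _ _ _)
        (by rw [← hfeed, ← pvCore qs [H] "user" r c]; exact pvAltFold_cgo_ne qs r c _)
    · -- insertion of the empty user turn at index 1
      rw [pvAPost,
        show pvIns (H :: (pvCgo (r, c) qs).map pvMkP)
            = H :: pvMk "user" "" :: (pvCgo (r, c) qs).map pvMkP from by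
          rw [hy, List.map_cons]
          exact pvIns_sys_other H _ _ hH (by rw [show pvMkP (r, c1) = pvMk r c1 from rfl, pvRole_mk]; exact hu),
        pvE0_sys H _ hH, List.foldl_cons, hstep1, List.foldl_cons, hstepU,
        pvCore qs [H, pvMk "user" ""] "assistant" r c]
      by_cases hsy : r = "system"
      · have hfeedS : pvAltStep ([H, pvMk "user" ""], "assistant") (pvMk r c) = ([H, pvMk "user" ""], "user") := by
          rw [pvAltStep_sys _ _ (by rw [pvRole_mk]; exact hsy) (by simp)]
        have hBside : pvBLoopF [H] "user" true "system" ((r, c) :: qs)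
            = pvBLoopF [H, pvMk "user" ""] "user" false r qs := by
          subst hsy
          simp [pvBLoopF]
        rw [hfeedS, hBside]
        exact pvPostF _ (pvBLoopF_pending qs _ _ _)
          (by rw [← hfeedS, ← pvCore qs [H, pvMk "user" ""] "assistant" r c]; exact pvAltFold_cgo_ne qs r c _)
      · by_cases ha : r = "assistant"
        · have hfeedA : pvAltStep ([H, pvMk "user" ""], "assistant") (pvMk r c)
              = ([H, pvMk "user" ""] ++ [pvMk r c], pvTog "assistant") := by
            rw [pvAltStep_hit _ r c hsy ha]
          have hBside : pvBLoopF [H] "user" true "system" ((r, c) :: qs)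
              = pvBLoopF ([H, pvMk "user" ""] ++ [pvMk r c]) (pvTog "assistant") false r qs := by
            subst ha
            simp [pvBLoopF, pvTog]
          rw [hfeedA, hBside]
          exact pvPostF _ (pvBLoopF_pending qs _ _ _)
            (by rw [← hfeedA, ← pvCore qs [H, pvMk "user" ""] "assistant" r c]; exact pvAltFold_cgo_ne qs r c _)
        · have hfeedO : pvAltStep ([H, pvMk "user" ""], "assistant") (pvMk r c)
              = (([H, pvMk "user" ""] ++ [pvMk "assistant" ""]) ++ [pvMk r c], pvTog (pvTog "assistant")) := by
            rw [pvAltStep_miss _ r c hsy ha]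
          have hBside : pvBLoopF [H] "user" true "system" ((r, c) :: qs)
              = pvBLoopF (([H, pvMk "user" ""] ++ [pvMk "assistant" ""]) ++ [pvMk r c]) (pvTog (pvTog "assistant")) false r qs := by
            simp only [pvBLoopF]
            rw [if_neg (by rintro ⟨h1, h2⟩; exact h2 h1), if_neg hsy]
            simp [hu, ha, pvTog]
          rw [hfeedO, hBside]
          exact pvPostF _ (pvBLoopF_pending qs _ _ _)
            (by rw [← hfeedO, ← pvCore qs [H, pvMk "user" ""] "assistant" r c]; exact pvAltFold_cgo_ne qs r c _)

-- the headless start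
theorem pvNoHead (l : List (String × String)) (hv : ∀ p ∈ l, p.1 ≠ "") :
    pvAPost (List.foldl pvCollapseStep [] (l.map pvMkP)) = pvBPost (pvBLoopF [] "user" true "" l) := by
  have hstepU0 : pvAltStep ([], "user") (pvMk "user" "") = ([pvMk "user" ""], "assistant") := by
    rw [pvAltStep_hit ([], "user") "user" "" (by decide) rfl]
    simp [pvTog]
  cases l with
  | nil =>
    rw [List.map_nil, List.foldl_nil, pvAPost, pvIns_nil,
      pvE0_nonsys _ _ (by rw [pvRole_mk]; decide), List.foldl_cons, hstepU0, List.foldl_nil]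
    rw [show ([pvMk "user" ""] : List (List (String × String))) = [] ++ [pvMk "user" ""] from rfl,
      pvTrail_app_user]
    rw [show pvBLoopF [] "user" true "" [] = ([], true) from rfl, pvBPost]
    simp
  | cons q qs =>
    obtain ⟨r, c⟩ := q
    have hr0 : r ≠ "" := hv (r, c) (by simp)
    have hfirst : List.foldl pvCollapseStep [] (((r, c) :: qs).map pvMkP)
        = (pvCgo (r, c) qs).map pvMkP := by
      rw [List.map_cons, List.foldl_cons,
        show pvCollapseStep [] (pvMkP (r, c)) = [] ++ [pvMk r c] from by
          rw [pvCollapseStep, if_neg (by rintro ⟨h, -⟩; exact h rfl)]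
          rfl]
      exact pvCollapse_eq qs [] r c
    rw [hfirst]
    by_cases hsy : r = "system"
    · subst hsy
      rw [pvCgo_sys]
      have hB : pvBLoopF [] "user" true "" (("system", c) :: qs)
          = pvBLoopF [pvMk "system" c] "user" true "system" qs := by
        simp [pvBLoopF]
      rw [show ((("system", c) :: pvRest qs).map pvMkP) = pvMk "system" c :: (pvRest qs).map pvMkP from rfl, hB]
      exact pvAfterSys qs (pvMk "system" c) (pvRole_mk _ _)
    · obtain ⟨c1, ys, hy⟩ := pvCgo_head qs r c
      have hhead : (pvCgo (r, c) qs).map pvMkP = pvMk r c1 :: ys.map pvMkP := by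
        rw [hy, List.map_cons]
        rfl
      by_cases hu : r = "user"
      · rw [pvAPost, hhead, pvIns_user _ _ (by rw [pvRole_mk]; exact hu),
          pvE0_nonsys _ _ (by rw [pvRole_mk]; exact hsy), ← hhead,
          pvCore qs [] "user" r c]
        have hfeed : pvAltStep ([], "user") (pvMk r c) = ([pvMk r c], "assistant") := by
          rw [pvAltStep_hit ([], "user") r c hsy hu]
          simp [pvTog]
        have hBside : pvBLoopF [] "user" true "" ((r, c) :: qs)
            = pvBLoopF [pvMk r c] "assistant" false r qs := by
          subst hu
          simp [pvBLoopF, pvTog]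
        rw [hfeed, hBside]
        exact pvPostF _ (pvBLoopF_pending qs _ _ _)
          (by rw [← hfeed, ← pvCore qs [] "user" r c]; exact pvAltFold_cgo_ne qs r c _)
      · -- r is neither "system" nor "user": insert the empty user turn at index 0
        rw [pvAPost, hhead, pvIns_other _ _ (by rw [pvRole_mk]; exact hsy) (by rw [pvRole_mk]; exact hu),
          pvE0_nonsys _ _ (by rw [pvRole_mk]; decide), List.foldl_cons, hstepU0, ← hhead,
          pvCore qs [pvMk "user" ""] "assistant" r c]
        by_cases ha : r = "assistant"
        · have hfeedA : pvAltStep ([pvMk "user" ""], "assistant") (pvMk r c)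
              = ([pvMk "user" ""] ++ [pvMk r c], pvTog "assistant") := by
            rw [pvAltStep_hit _ r c hsy ha]
          have hBside : pvBLoopF [] "user" true "" ((r, c) :: qs)
              = pvBLoopF ([pvMk "user" ""] ++ [pvMk r c]) (pvTog "assistant") false r qs := by
            subst ha
            simp [pvBLoopF, pvTog]
          rw [hfeedA, hBside]
          exact pvPostF _ (pvBLoopF_pending qs _ _ _)
            (by rw [← hfeedA, ← pvCore qs [pvMk "user" ""] "assistant" r c]; exact pvAltFold_cgo_ne qs r c _)
        · have hfeedO : pvAltStep ([pvMk "user" ""], "assistant") (pvMk r c)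
              = (([pvMk "user" ""] ++ [pvMk "assistant" ""]) ++ [pvMk r c], pvTog (pvTog "assistant")) := by
            rw [pvAltStep_miss _ r c hsy ha]
          have hBside : pvBLoopF [] "user" true "" ((r, c) :: qs)
              = pvBLoopF (([pvMk "user" ""] ++ [pvMk "assistant" ""]) ++ [pvMk r c]) (pvTog (pvTog "assistant")) false r qs := by
            simp only [pvBLoopF]
            rw [if_neg (by rintro ⟨h1, -⟩; exact hr0 h1), if_neg hsy]
            simp [hu, ha, pvTog]
          rw [hfeedO, hBside]
          exact pvPostF _ (pvBLoopF_pending qs _ _ _)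
            (by rw [← hfeedO, ← pvCore qs [pvMk "user" ""] "assistant" r c]; exact pvAltFold_cgo_ne qs r c _)

-- the system-arg head case
theorem pvWithHead (s : String) (l : List (String × String)) :
    pvAPost (List.foldl pvCollapseStep [pvMk "system" s] (l.map pvMkP))
      = pvBPost (pvBLoopF [pvMk "system" s] "user" true "system" l) := by
  cases l with
  | nil => exact pvAfterSys [] (pvMk "system" s) (pvRole_mk _ _)
  | cons q qs =>
    obtain ⟨r, c⟩ := q
    have hfirst : List.foldl pvCollapseStep [pvMk "system" s] (((r, c) :: qs).map pvMkP)
        = pvMk "system" s :: (pvCgo (r, c) qs).map pvMkP := by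
      rw [List.map_cons, List.foldl_cons,
        show pvCollapseStep [pvMk "system" s] (pvMkP (r, c)) = [pvMk "system" s] ++ [pvMk r c] from by
          rw [pvCollapseStep, if_neg]
          · rfl
          · rw [pvGetDlast]
            simp only [pvMkP, pvRole_mk]
            rintro ⟨-, h1, h2⟩
            exact h2 h1.symm]
      exact pvCollapse_eq qs [pvMk "system" s] r c
    rw [hfirst]
    exact pvAfterSys ((r, c) :: qs) (pvMk "system" s) (pvRole_mk _ _)

theorem pvPairs_ne (messages : List (List (String × String))) :
    ∀ p ∈ pvPairs messages, p.1 ≠ "" := by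
  intro p hp
  simp only [pvPairs, List.mem_map, List.mem_filter] at hp
  obtain ⟨m, ⟨-, hk⟩, rfl⟩ := hp
  simp only [pvKeep, Bool.and_eq_true] at hk
  rcases hg : pvGet? m "role" with _ | r
  · rw [hg] at hk
    simp [pvValidRole?] at hk
  · rw [hg] at hk
    simp only [pvValidRole?, Bool.or_eq_true, beq_iff_eq] at hk
    simp only [pvGetD, hg, Option.getD_some, ne_eq]
    rcases hk.2 with (h | h) | h <;> subst h <;> decide

theorem pvMain (messages : List (List (String × String))) (system : Option String) :
    pvAPre messages system = pvBPre messages system := by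
  unfold pvAPre pvBPre
  rw [pvCleaned_eq, pvBLoop_eq]
  cases system with
  | none => simpa [pvHead] using pvNoHead (pvPairs messages) (pvPairs_ne messages)
  | some s =>
    by_cases hs : s = ""
    · simpa [pvHead, hs] using pvNoHead (pvPairs messages) (pvPairs_ne messages)
    · simpa [pvHead, hs] using pvWithHead s (pvPairs messages)

-- ===== VERDICT (by name: the statement is the Claim_ definition above) =====
theorem normalize_dialog_py_spec : Claim_equal_normalize_dialog_py := by
  intro messages system keep_last _
  unfold Spec_normalize_dialog_py normalize_dialog_py normalize_dialog_py_alt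
  rw [pvMain]
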